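-- pv_equiv track=rewrite | github.com/nnocturnnn/py-leetcode-solutions | 2149-remove-colored-pieces-if-both-neighbors-are-the-same-color/2023-10-02 00.14.31 - Accepted - runtime 314ms - memory 17.4MB.py | winnerOfGame
-- ===== SOURCE A (Python) =====
-- def winnerOfGame(colors: str) -> bool:
--     win = 0
--     for i in range(1, len(colors) - 1):
--         if colors[i-1:i+2] == "AAA":
--             win += 1
--         if colors[i-1:i+2] == "BBB":
--             win -= 1
--     return True if win > 0 else False
-- ===== SOURCE B (Python) =====
-- def winnerOfGame(colors: str) -> bool:
--     a_moves = 0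
--     b_moves = 0
--     run_char = ''
--     run_len = 0
--     for ch in colors:
--         if ch == run_char:
--             run_len += 1
--         else:
--             if run_char == 'A' and run_len > 2:
--                 a_moves += run_len - 2
--             if run_char == 'B' and run_len > 2:
--                 b_moves += run_len - 2
--             run_char = ch
--             run_len = 1
--     if run_char == 'A' and run_len > 2:
--         a_moves += run_len - 2
--     if run_char == 'B' and run_len > 2:
--         b_moves += run_len - 2
--     return a_moves > b_moves
-- ===== Notes on version B (the rewrite author's own statement) =====
-- stated objective: faster
-- what changed: Replaced A's per-index 3-character slice comparison over every window by a single run-length pass that tracks the current run's character and length and adds max(0, run_len - 2) to a per-colour counter at each run boundary.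
import Mathlib
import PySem

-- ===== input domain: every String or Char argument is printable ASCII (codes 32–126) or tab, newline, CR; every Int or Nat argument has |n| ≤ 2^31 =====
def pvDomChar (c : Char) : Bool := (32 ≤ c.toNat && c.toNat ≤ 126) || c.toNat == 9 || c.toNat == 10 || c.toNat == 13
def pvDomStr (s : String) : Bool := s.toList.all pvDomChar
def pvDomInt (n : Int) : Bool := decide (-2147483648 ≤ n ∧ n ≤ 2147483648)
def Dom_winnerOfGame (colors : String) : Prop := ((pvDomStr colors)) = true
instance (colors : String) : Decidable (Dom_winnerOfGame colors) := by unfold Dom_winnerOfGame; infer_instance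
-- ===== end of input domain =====

-- B replaces A's per-index 3-character slicing pass by a single run-length pass
-- (one counter per colour, flushed at each run boundary); objective: alternative decomposition.

-- ===== PORT A =====
-- A: win = 0; for i in range(1, len-1): win += [slice == "AAA"]; win -= [slice == "BBB"]; return win > 0
def winnerOfGame (colors : String) : Bool :=
  let cs := colors.toList
  let win : Int :=
    (PySem.List.pyRange 1 (PySem.Chars.len cs - 1)).foldl
      (fun win i =>
        let win := if PySem.Chars.slice cs (some (i - 1)) (some (i + 2)) = ['A', 'A', 'A'] then win + 1 else win
        if PySem.Chars.slice cs (some (i - 1)) (some (i + 2)) = ['B', 'B', 'B'] then win - 1 else win)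
      0
  decide (win > 0)

-- ===== PORT B =====
-- one step of B's loop: state (a_moves, b_moves, run_char, run_len); run_char = none is Python's ''
def wogStep (st : Int × Int × Option Char × Int) (ch : Char) : Int × Int × Option Char × Int :=
  match st with
  | (a, b, rc, rl) =>
    if rc = some ch then (a, b, rc, rl + 1)
    else
      let a := if rc = some 'A' ∧ rl > 2 then a + (rl - 2) else a
      let b := if rc = some 'B' ∧ rl > 2 then b + (rl - 2) else b
      (a, b, some ch, 1)

def winnerOfGame_alt (colors : String) : Bool :=
  match colors.toList.foldl wogStep (0, 0, none, 0) with
  | (a, b, rc, rl) =>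
    let a := if rc = some 'A' ∧ rl > 2 then a + (rl - 2) else a
    let b := if rc = some 'B' ∧ rl > 2 then b + (rl - 2) else b
    decide (a > b)

-- ===== PRECONDITION & SPEC =====
def Spec_winnerOfGame (colors : String) (out : Bool) : Prop := out = winnerOfGame_alt colors
instance (colors : String) (out : Bool) : Decidable (Spec_winnerOfGame colors out) := by unfold Spec_winnerOfGame; infer_instance

-- ===== CLAIM (what is proved, stated in full; the proofs are below) =====
def Claim_equal_winnerOfGame : Prop := ∀ (colors : String), Dom_winnerOfGame colors → Spec_winnerOfGame colors (winnerOfGame colors)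

-- ===== LEMMAS AND PROOFS =====

-- net tally (+1 for AAA, −1 for BBB) of one window
def tri3 (a b c : Char) : Int :=
  (if a = 'A' ∧ b = 'A' ∧ c = 'A' then 1 else 0) - (if a = 'B' ∧ b = 'B' ∧ c = 'B' then 1 else 0)

-- net tally over all length-3 windows of a list
def triSum : List Char → Int
  | a :: b :: c :: rest => tri3 a b c + triSum (b :: c :: rest)
  | _ => 0

theorem triSum_nil : triSum [] = 0 := rfl
theorem triSum_one (a : Char) : triSum [a] = 0 := rfl
theorem triSum_two (a b : Char) : triSum [a, b] = 0 := rfl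
theorem triSum_cons₃ (a b c : Char) (t : List Char) :
    triSum (a :: b :: c :: t) = tri3 a b c + triSum (b :: c :: t) := rfl

-- ===== A-side characterisation =====

-- net tally of one window given as a list (A's slice-comparison view)
def triW (w : List Char) : Int :=
  (if w = ['A', 'A', 'A'] then 1 else 0) - (if w = ['B', 'B', 'B'] then 1 else 0)

theorem sum_windows (cs : List Char) :
    ((List.range (cs.length - 2)).map (fun k => triW ((cs.drop k).take 3))).sum = triSum cs := by
  induction cs with
  | nil => rfl
  | cons a t ih =>
    match t with
    | [] => rfl
    | [b] => rfl
    | b :: c :: t' =>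
      have hlen : (a :: b :: c :: t').length - 2 = t'.length + 1 := by simp
      rw [hlen, List.range_succ_eq_map, List.map_cons, List.map_map, List.sum_cons]
      have h0 : triW (((a :: b :: c :: t').drop 0).take 3) = tri3 a b c := by
        simp [triW, tri3]
      have h1 : ((List.range t'.length).map
          ((fun k => triW (((a :: b :: c :: t').drop k).take 3)) ∘ Nat.succ)).sum
          = ((List.range ((b :: c :: t').length - 2)).map
              (fun k => triW (((b :: c :: t').drop k).take 3))).sum := by
        simp [Function.comp_def]
      rw [h0, h1, ih, triSum_cons₃]

theorem foldA (cs : List Char) :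
    List.foldl
      (fun win i =>
        let win := if PySem.Chars.slice cs (some (i - 1)) (some (i + 2)) = ['A', 'A', 'A'] then win + 1 else win
        if PySem.Chars.slice cs (some (i - 1)) (some (i + 2)) = ['B', 'B', 'B'] then win - 1 else win)
      (0 : Int) (PySem.List.pyRange 1 (PySem.Chars.len cs - 1)) = triSum cs := by
  rw [PySem.Chars.len_eq, PySem.List.pyRange_one]
  have hN : ((cs.length : Int) - 1 - 1).toNat = cs.length - 2 := by omega
  rw [hN, List.foldl_map]
  rw [List.foldl_ext _ (fun (w : Int) (k : Nat) => w + triW ((cs.drop k).take 3)) 0 ?_]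
  · rw [PySem.List.foldl_add, sum_windows]; simp
  · intro w k _
    have e1 : (1 + (k : Int) - 1) = ((k : Nat) : Int) := by ring
    have e2 : (1 + (k : Int) + 2) = ((k : Nat) : Int) + ((3 : Nat) : Int) := by push_cast; ring
    simp only [e1, e2, PySem.Chars.slice_eq_listSlice, PySem.List.slice_natCast_add, triW]
    split_ifs <;> ring

theorem A_char (colors : String) :
    winnerOfGame colors = decide (0 < triSum colors.toList) := by
  simp only [winnerOfGame, gt_iff_lt]
  rw [foldA]

-- ===== B-side characterisation =====

def finDiff (st : Int × Int × Option Char × Int) : Int :=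
  match st with
  | (a, b, rc, rl) =>
    (if rc = some 'A' ∧ rl > 2 then a + (rl - 2) else a) -
    (if rc = some 'B' ∧ rl > 2 then b + (rl - 2) else b)

theorem tri3_same (x : Char) :
    tri3 x x x = if x = 'A' then 1 else if x = 'B' then -1 else 0 := by
  unfold tri3
  split_ifs <;> simp_all

theorem tri3_ne_mid (x ch r : Char) (h : ch ≠ x) : tri3 x ch r = 0 := by
  have hA : ¬(x = 'A' ∧ ch = 'A' ∧ r = 'A') := by rintro ⟨rfl, rfl, -⟩; exact h rfl
  have hB : ¬(x = 'B' ∧ ch = 'B' ∧ r = 'B') := by rintro ⟨rfl, rfl, -⟩; exact h rfl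
  simp [tri3, hA, hB]

theorem tri3_ne_last (x ch : Char) (h : ch ≠ x) : tri3 x x ch = 0 := by
  have hA : ¬(x = 'A' ∧ x = 'A' ∧ ch = 'A') := by rintro ⟨rfl, -, rfl⟩; exact h rfl
  have hB : ¬(x = 'B' ∧ x = 'B' ∧ ch = 'B') := by rintro ⟨rfl, -, rfl⟩; exact h rfl
  simp [tri3, hA, hB]

theorem triSum_replicate (x : Char) (k : Nat) :
    triSum (List.replicate k x) = if x = 'A' ∧ (k : Int) > 2 then (k : Int) - 2
      else if x = 'B' ∧ (k : Int) > 2 then -((k : Int) - 2) else 0 := by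
  induction k with
  | zero => simp [triSum_nil]
  | succ n ih =>
    match n, ih with
    | 0, _ => simp [List.replicate, triSum_one]
    | 1, _ => simp [List.replicate, triSum_two]
    | (m + 2), ih =>
      have hrep : List.replicate (m + 3) x = x :: x :: x :: List.replicate m x := by
        simp [List.replicate_succ]
      have hrep2 : List.replicate (m + 2) x = x :: x :: List.replicate m x := by
        simp [List.replicate_succ]
      rw [hrep, triSum_cons₃, ← hrep2, ih, tri3_same]
      push_cast
      split_ifs <;> simp_all <;> omega

theorem triSum_run_split (x ch : Char) (rest : List Char) (k : Nat) (hne : ch ≠ x) :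
    triSum (List.replicate k x ++ ch :: rest) = triSum (List.replicate k x) + triSum (ch :: rest) := by
  induction k with
  | zero => simp [triSum_nil]
  | succ n ih =>
    match n, ih with
    | 0, _ =>
      match rest with
      | [] => simp [List.replicate, triSum_two, triSum_one]
      | r :: t =>
        show triSum (x :: ch :: r :: t) = triSum [x] + triSum (ch :: r :: t)
        rw [triSum_cons₃, tri3_ne_mid x ch r hne, triSum_one]
    | 1, _ =>
      show triSum (x :: x :: ch :: rest) = triSum [x, x] + triSum (ch :: rest)
      rw [triSum_cons₃, tri3_ne_last x ch hne, triSum_two]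
      match rest with
      | [] => simp [triSum_two, triSum_one]
      | r :: t =>
        rw [triSum_cons₃, tri3_ne_mid x ch r hne]
        ring
    | (m + 2), ih =>
      have e : List.replicate (m + 3) x ++ ch :: rest
          = x :: x :: x :: (List.replicate m x ++ ch :: rest) := by simp [List.replicate_succ]
      have e2 : x :: x :: (List.replicate m x ++ ch :: rest)
          = List.replicate (m + 2) x ++ ch :: rest := by simp [List.replicate_succ]
      have hr : triSum (List.replicate (m + 3) x) = tri3 x x x + triSum (List.replicate (m + 2) x) := by
        rw [show List.replicate (m + 3) x = x :: x :: x :: List.replicate m x by simp [List.replicate_succ],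
          triSum_cons₃,
          show x :: x :: List.replicate m x = List.replicate (m + 2) x by simp [List.replicate_succ]]
      rw [e, triSum_cons₃, e2, ih, hr]
      ring

theorem B_inv (cs : List Char) : ∀ (a b : Int) (x : Char) (k : Nat), 1 ≤ k →
    finDiff (cs.foldl wogStep (a, b, some x, (k : Int))) = a - b + triSum (List.replicate k x ++ cs) := by
  induction cs with
  | nil =>
    intro a b x k hk
    simp only [List.foldl_nil, List.append_nil, finDiff, triSum_replicate, Option.some.injEq]
    rcases eq_or_ne x 'A' with rfl | hxA
    · simp only [show ¬(('A' : Char) = 'B') from by decide, false_and, if_false, true_and]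
      split_ifs <;> omega
    · rcases eq_or_ne x 'B' with rfl | hxB
      · simp only [show ¬(('B' : Char) = 'A') from by decide, false_and, if_false, true_and]
        split_ifs <;> omega
      · simp only [hxA, hxB, false_and, if_false]
        omega
  | cons ch rest ih =>
    intro a b x k hk
    rw [List.foldl_cons]
    by_cases hx : x = ch
    · subst hx
      have hstep : wogStep (a, b, some x, (k : Int)) x = (a, b, some x, (k : Int) + 1) := by
        simp [wogStep]
      rw [hstep]
      have hcast : ((k : Int) + 1) = ((k + 1 : Nat) : Int) := by push_cast; ring
      rw [hcast, ih a b x (k + 1) (by omega)]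
      have hl : List.replicate (k + 1) x ++ rest = List.replicate k x ++ x :: rest := by
        rw [List.replicate_succ']
        simp
      rw [hl]
    · have hsx : ¬(some x = some ch) := by simpa using hx
      have hstep : wogStep (a, b, some x, (k : Int)) ch =
          ((if some x = some 'A' ∧ (k : Int) > 2 then a + ((k : Int) - 2) else a),
           (if some x = some 'B' ∧ (k : Int) > 2 then b + ((k : Int) - 2) else b), some ch, 1) := by
        simp [wogStep, hsx]
      rw [hstep]
      have h1 : ((1 : Int)) = ((1 : Nat) : Int) := by norm_num
      rw [h1, ih _ _ ch 1 (by omega)]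
      have hsplit := triSum_run_split x ch rest k (fun h => hx h.symm)
      have hrep1 : List.replicate 1 ch ++ rest = ch :: rest := by simp
      rw [hrep1, hsplit, triSum_replicate]
      simp only [Option.some.injEq]
      rcases eq_or_ne x 'A' with rfl | hxA
      · simp only [show ¬(('A' : Char) = 'B') from by decide, false_and, if_false, true_and]
        split_ifs <;> omega
      · rcases eq_or_ne x 'B' with rfl | hxB
        · simp only [show ¬(('B' : Char) = 'A') from by decide, false_and, if_false, true_and]
          split_ifs <;> omega
        · simp only [hxA, hxB, false_and, if_false]
          omega

theorem B_char (colors : String) :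
    winnerOfGame_alt colors = decide (0 < triSum colors.toList) := by
  unfold winnerOfGame_alt
  match hcs : colors.toList with
  | [] => rfl
  | ch :: rest =>
    have hstep : wogStep (0, 0, none, 0) ch = (0, 0, some ch, 1) := by simp [wogStep]
    rw [List.foldl_cons, hstep]
    have hinv := B_inv rest 0 0 ch 1 (by omega)
    push_cast at hinv
    simp only [List.singleton_append] at hinv
    obtain ⟨⟨a, b, rc, rl⟩, hst⟩ : ∃ st, rest.foldl wogStep (0, 0, some ch, 1) = st := ⟨_, rfl⟩
    rw [hst] at hinv ⊢
    simp only [finDiff] at hinv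
    simp only []
    rw [decide_eq_decide]
    constructor <;> intro h <;> omega

-- ===== VERDICT (by name: the statement is the Claim_ definition above) =====
theorem winnerOfGame_spec : Claim_equal_winnerOfGame := by
  intro colors _
  unfold Spec_winnerOfGame
  rw [A_char, B_char]
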